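-- pv_equiv track=rewrite | github.com/ljackso/advent_of_code_2018 | day_2.py | contains_duplicates
-- ===== SOURCE A (Python) =====
-- def contains_duplicates(str_id, amount):
--
--     count = {}
--     for letter in str_id:
--         if letter in count.keys():
--             count[letter] += 1
--         else:
--             count[letter] = 1
--
--     matches = 0
--     for key in count:
--         if count[key] == amount:
--             matches += 1
--
--     return matches > 0
-- ===== SOURCE B (Python) =====
-- def contains_duplicates(str_id, amount):
--     # Sort the letters so equal letters are contiguous, then scan run lengths.
--     s = sorted(str_id)
--     while s:
--         run = 1
--         while run < len(s) and s[run] == s[0]: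
--             run += 1
--         if run == amount:
--             return True
--         s = s[run:]
--     return False
-- ===== Notes on version B (the rewrite author's own statement) =====
-- stated objective: alternative
-- what changed: B sorts the letters and scans the sorted list's runs of equal letters, returning True when a run of length amount is found; it maintains no frequency table at all.
import Mathlib
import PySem

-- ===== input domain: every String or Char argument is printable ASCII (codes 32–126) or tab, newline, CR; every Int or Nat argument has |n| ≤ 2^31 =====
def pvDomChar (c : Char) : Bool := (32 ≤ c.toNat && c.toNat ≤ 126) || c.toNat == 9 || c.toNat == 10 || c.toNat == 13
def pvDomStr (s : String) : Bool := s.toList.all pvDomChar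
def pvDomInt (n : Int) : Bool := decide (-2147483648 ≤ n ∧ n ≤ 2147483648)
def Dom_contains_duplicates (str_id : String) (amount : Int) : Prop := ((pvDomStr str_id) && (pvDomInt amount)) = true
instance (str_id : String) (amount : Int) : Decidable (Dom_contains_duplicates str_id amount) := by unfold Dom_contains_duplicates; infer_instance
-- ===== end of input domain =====

-- B replaces A's frequency dictionary by sort-then-run-scan: sort the letters, then
-- look for a maximal run of equal letters whose length is exactly `amount` (objective: alternative).

-- ===== PORT A =====
def contains_duplicates (str_id : String) (amount : Int) : Bool :=
  let count := str_id.toList.foldl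
    (fun d letter =>
      if d.contains letter then d.insert letter (d.getD letter 0 + 1)
      else d.insert letter 1)
    (PySem.Dict.empty : PySem.Dict Char Int)
  let matched : Int := count.keys.foldl
    (fun m key => if count.getD key 0 == amount then m + 1 else m) 0
  decide (matched > 0)

-- ===== PORT B =====
-- inner `while run < len(s) and s[run] == s[0]` loop: length of the prefix of t equal to c
def pvRunLen (c : Char) : List Char → Nat
  | [] => 0
  | x :: t => if x == c then pvRunLen c t + 1 else 0

-- outer `while s:` loop: check the first run, then continue on s[run:]
def pvScan (amount : Int) (s : List Char) : Bool :=
  match s with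
  | [] => false
  | c :: t =>
    if ((1 + pvRunLen c t : Nat) : Int) == amount then true
    else pvScan amount (t.drop (pvRunLen c t))
termination_by s.length
decreasing_by simp

def contains_duplicates_alt (str_id : String) (amount : Int) : Bool :=
  pvScan amount (PySem.List.sorted str_id.toList (fun x => x) false)

-- ===== PRECONDITION & SPEC =====
def Spec_contains_duplicates (str_id : String) (amount : Int) (out : Bool) : Prop := out = contains_duplicates_alt str_id amount
instance (str_id : String) (amount : Int) (out : Bool) : Decidable (Spec_contains_duplicates str_id amount out) := by unfold Spec_contains_duplicates; infer_instance

-- ===== CLAIM (what is proved, stated in full; the proofs are below) =====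
def Claim_equal_contains_duplicates : Prop := ∀ (str_id : String) (amount : Int), Dom_contains_duplicates str_id amount → Spec_contains_duplicates str_id amount (contains_duplicates str_id amount)

-- ===== LEMMAS AND PROOFS =====

-- A's dict-building loop is exactly the counter loop.
lemma dict_loop_eq_counter (l : List Char) :
    l.foldl
      (fun d letter =>
        if d.contains letter then d.insert letter (d.getD letter 0 + 1)
        else d.insert letter 1)
      (PySem.Dict.empty : PySem.Dict Char Int)
      = PySem.Dict.counter l := by
  rw [← PySem.Dict.foldl_insert_getD_add_one_eq_counter]
  apply PySem.List.foldl_congr_mem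
  intro d x _
  by_cases hc : d.contains x
  · simp [hc]
  · have h0 : d.getD x 0 = 0 := PySem.Dict.getD_of_not_contains d 0 (by simpa using hc)
    simp [hc, h0]

-- A returns true iff some letter of the string occurs exactly `amount` times.
lemma contains_duplicates_iff (str_id : String) (amount : Int) :
    contains_duplicates str_id amount = true ↔
      ∃ c ∈ str_id.toList, ((str_id.toList.count c : Int)) = amount := by
  simp only [contains_duplicates, dict_loop_eq_counter]
  rw [PySem.List.foldl_if_add_one (fun k => (PySem.Dict.counter str_id.toList).getD k 0 == amount)]
  rw [PySem.Dict.keys_counter]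
  simp only [zero_add, decide_eq_true_eq, gt_iff_lt, Int.natCast_pos, List.countP_pos_iff,
    PySem.Dict.getD_counter, beq_iff_eq, PySem.Set.mem_ofList]

-- the prefix of t matched by pvRunLen is all c's
lemma take_pvRunLen (c : Char) (t : List Char) :
    t.take (pvRunLen c t) = List.replicate (pvRunLen c t) c := by
  induction t with
  | nil => simp [pvRunLen]
  | cons x t ih =>
    by_cases hx : x = c
    · subst hx; simp [pvRunLen, List.replicate_succ, ih]
    · simp [pvRunLen, hx]

-- past the first run of a sorted tail, every letter is strictly larger
lemma gt_of_mem_drop_pvRunLen (c : Char) (t : List Char)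
    (hge : ∀ x ∈ t, c ≤ x) (hp : t.Pairwise (· ≤ ·)) :
    ∀ x ∈ t.drop (pvRunLen c t), c < x := by
  induction t with
  | nil => simp
  | cons y t ih =>
    by_cases hy : y = c
    · subst hy
      simp only [pvRunLen, beq_self_eq_true, if_true, List.drop_succ_cons]
      exact ih (fun x hx => le_trans (le_refl y) ((List.pairwise_cons.mp hp).1 x hx))
        (List.pairwise_cons.mp hp).2
    · have h0 : pvRunLen c (y :: t) = 0 := by simp [pvRunLen, hy]
      rw [h0, List.drop_zero]
      intro x hx
      have hcy : c < y := lt_of_le_of_ne (hge y (by simp)) (Ne.symm hy)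
      rcases List.mem_cons.mp hx with h | h
      · exact h ▸ hcy
      · exact lt_of_lt_of_le hcy ((List.pairwise_cons.mp hp).1 x h)

-- pvScan on a sorted list returns true iff some letter of it occurs exactly amount times
lemma pvScan_iff (amount : Int) :
    ∀ s : List Char, s.Pairwise (· ≤ ·) →
      (pvScan amount s = true ↔ ∃ c ∈ s, ((s.count c : Int)) = amount) := by
  intro s
  induction s using pvScan.induct amount with
  | case1 => intro _; simp [pvScan]
  | case2 c t hcond =>
    intro hp
    -- facts about the decomposition of c :: t
    obtain ⟨hge, hpt⟩ := List.pairwise_cons.mp hp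
    have hgt := gt_of_mem_drop_pvRunLen c t hge hpt
    have hsplit : t = List.replicate (pvRunLen c t) c ++ t.drop (pvRunLen c t) := by
      conv_lhs => rw [← List.take_append_drop (pvRunLen c t) t]
      rw [take_pvRunLen]
    have hcnt : (c :: t).count c = 1 + pvRunLen c t := by
      rw [List.count_cons_self]
      conv_lhs => rw [hsplit]
      rw [List.count_append, List.count_replicate_self,
        List.count_eq_zero.mpr (fun h => lt_irrefl c (hgt c h))]
      omega
    rw [pvScan]
    simp only [hcond, if_true, true_iff]
    exact ⟨c, by simp, by rw [hcnt]; exact_mod_cast eq_of_beq hcond⟩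
  | case3 c t hcond ih =>
    intro hp
    obtain ⟨hge, hpt⟩ := List.pairwise_cons.mp hp
    have hgt := gt_of_mem_drop_pvRunLen c t hge hpt
    have hsplit : t = List.replicate (pvRunLen c t) c ++ t.drop (pvRunLen c t) := by
      conv_lhs => rw [← List.take_append_drop (pvRunLen c t) t]
      rw [take_pvRunLen]
    have hcnt : (c :: t).count c = 1 + pvRunLen c t := by
      rw [List.count_cons_self]
      conv_lhs => rw [hsplit]
      rw [List.count_append, List.count_replicate_self,
        List.count_eq_zero.mpr (fun h => lt_irrefl c (hgt c h))]
      omega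
    have hne : ((1 + pvRunLen c t : Nat) : Int) ≠ amount := by
      intro h
      exact absurd (beq_iff_eq.mpr h) (by simpa using hcond)
    have hprest : (t.drop (pvRunLen c t)).Pairwise (· ≤ ·) :=
      hpt.sublist (List.drop_sublist _ _)
    -- counts of letters of the rest are unchanged by the run of c's
    have hcnt_rest : ∀ x ∈ t.drop (pvRunLen c t),
        (c :: t).count x = (t.drop (pvRunLen c t)).count x := by
      intro x hx
      have hxc : x ≠ c := fun h => lt_irrefl c (h ▸ hgt x hx)
      rw [List.count_cons_of_ne (Ne.symm hxc)]
      conv_lhs => rw [hsplit]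
      rw [List.count_append, List.count_replicate]
      simp [Ne.symm hxc]
    rw [pvScan]
    simp only [hcond, Bool.false_eq_true, if_false]
    rw [ih hprest]
    constructor
    · rintro ⟨x, hx, hxa⟩
      exact ⟨x, by rw [hsplit]; exact List.mem_cons_of_mem _ (List.mem_append_right _ hx), by rw [hcnt_rest x hx]; exact hxa⟩
    · rintro ⟨x, hx, hxa⟩
      rcases List.mem_cons.mp hx with h | h
      · exact absurd hxa (by rw [h, hcnt]; exact_mod_cast hne)
      · rw [hsplit] at h
        rcases List.mem_append.mp h with h | h
        · have : x = c := List.eq_of_mem_replicate h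
          exact absurd hxa (by rw [this, hcnt]; exact_mod_cast hne)
        · exact ⟨x, h, by rw [← hcnt_rest x h]; exact hxa⟩

-- ===== VERDICT (by name: the statement is the Claim_ definition above) =====
theorem contains_duplicates_spec : Claim_equal_contains_duplicates := by
  intro str_id amount _
  show contains_duplicates str_id amount = contains_duplicates_alt str_id amount
  have hperm := PySem.List.sorted_perm (xs := str_id.toList) (key := fun x : Char => x) (rev := false)
  have hpair := PySem.List.sorted_pairwise (xs := str_id.toList) (key := fun x : Char => x)
  rw [Bool.eq_iff_iff, contains_duplicates_iff, contains_duplicates_alt,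
    pvScan_iff amount _ hpair]
  constructor
  · rintro ⟨x, hx, hxa⟩
    exact ⟨x, hperm.symm.mem_iff.mp hx, by rw [hperm.count_eq]; exact hxa⟩
  · rintro ⟨x, hx, hxa⟩
    exact ⟨x, hperm.mem_iff.mp hx, by rw [← hperm.count_eq]; exact hxa⟩
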